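-- pv_equiv track=rewrite | github.com/commonsense/conceptnet5 | conceptnet5/uri.py | parse_compound_uri
-- ===== SOURCE A (Python) =====
-- def join_uri(*pieces):
--     """
--     `join_uri` builds a URI from constituent pieces that should be joined
--     with slashes (/).
--
--     Leading and trailing on the pieces are acceptable, but will be ignored.
--     The resulting URI will always begin with a slash and have its pieces
--     separated by a single slash.
--
--     The pieces do not have `normalize_text` applied to them; to make sure your
--     URIs are in normal form, run `normalize_text` on each piece that represents
--     arbitrary text.
--
--     >>> join_uri('/c', 'en', 'cat')
--     '/c/en/cat'
--
--     >>> join_uri('c', 'en', ' spaces ')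
--     '/c/en/ spaces '
--
--     >>> join_uri('/r/', 'AtLocation/')
--     '/r/AtLocation'
--
--     >>> join_uri('/test')
--     '/test'
--
--     >>> join_uri('test')
--     '/test'
--
--     >>> join_uri('/test', '/more/')
--     '/test/more'
--     """
--     joined = '/' + ('/'.join([piece.strip('/') for piece in pieces]))
--     return joined
--
-- def split_uri(uri):
--     """
--     Get the slash-delimited pieces of a URI.
--
--     >>> split_uri('/c/en/cat/n/feline')
--     ['c', 'en', 'cat', 'n', 'feline']
--     >>> split_uri('/')
--     []
--     """
--     uri2 = uri.lstrip('/')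
--     if not uri2:
--         return []
--     return uri2.split('/')
--
-- def parse_compound_uri(uri):
--     """
--     Given a compound URI, extract its operator and its list of arguments.
--
--     >>> parse_compound_uri('/nothing/[/]')
--     ('/nothing', [])
--     >>> parse_compound_uri('/a/[/r/CapableOf/,/c/en/cat/,/c/en/sleep/]')
--     ('/a', ['/r/CapableOf', '/c/en/cat', '/c/en/sleep'])
--     >>> parse_compound_uri('/or/[/and/[/s/one/,/s/two/]/,/and/[/s/three/,/s/four/]/]')
--     ('/or', ['/and/[/s/one/,/s/two/]', '/and/[/s/three/,/s/four/]'])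
--     """
--     pieces = split_uri(uri)
--     if pieces[-1] != ']':
--         raise ValueError("Compound URIs must end with /]")
--     if '[' not in pieces:
--         raise ValueError("Compound URIs must contain /[/ at the beginning of "
--                          "the argument list")
--     list_start = pieces.index('[')
--     op = join_uri(*pieces[:list_start])
--
--     chunks = []
--     current = []
--     depth = 0
--
--     # Split on commas, but not if they're within additional pairs of brackets.
--     for piece in pieces[(list_start + 1):-1]:
--         if piece == ',' and depth == 0:
--             chunks.append('/' + ('/'.join(current)).strip('/'))
--             current = []
--         else:
--             current.append(piece)
--             if piece == '[':
--                 depth += 1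
--             elif piece == ']':
--                 depth -= 1
--
--     assert depth == 0, "Unmatched brackets in %r" % uri
--     if current:
--         chunks.append('/' + ('/'.join(current)).strip('/'))
--     return op, chunks
-- ===== SOURCE B (Python) =====
-- def join_uri(*pieces):
--     joined = '/' + ('/'.join([piece.strip('/') for piece in pieces]))
--     return joined
--
-- def split_uri(uri):
--     uri2 = uri.lstrip('/')
--     if not uri2:
--         return []
--     return uri2.split('/')
--
-- def _split_top(ps, depth):
--     """Split ps at top-level commas, returning the list of segments
--     (recursive descent; always returns at least one segment)."""
--     if not ps:
--         return [[]]
--     head, rest = ps[0], ps[1:]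
--     if head == ',' and depth == 0:
--         return [[]] + _split_top(rest, 0)
--     segs = _split_top(rest, depth + (head == '[') - (head == ']'))
--     return [[head] + segs[0]] + segs[1:]
--
-- def parse_compound_uri(uri):
--     pieces = split_uri(uri)
--     if pieces[-1] != ']':
--         raise ValueError("Compound URIs must end with /]")
--     if '[' not in pieces:
--         raise ValueError("Compound URIs must contain /[/ at the beginning of "
--                          "the argument list")
--     list_start = pieces.index('[')
--     op = join_uri(*pieces[:list_start])
--     inner = pieces[(list_start + 1):-1]
--     assert inner.count('[') == inner.count(']'), "Unmatched brackets in %r" % uri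
--     segs = _split_top(inner, 0)
--     if not segs[-1]:
--         segs.pop()
--     return op, ['/' + '/'.join(seg).strip('/') for seg in segs]
-- ===== Notes on version B (the rewrite author's own statement) =====
-- stated objective: alternative
-- what changed: Replaces A's single imperative loop threading (chunks, current, depth) mutable state and emitting formatted chunks inline with a recursive top-level splitter that builds the list of argument segments directly, a pop of the trailing empty segment, and a final formatting map.
import Mathlib
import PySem

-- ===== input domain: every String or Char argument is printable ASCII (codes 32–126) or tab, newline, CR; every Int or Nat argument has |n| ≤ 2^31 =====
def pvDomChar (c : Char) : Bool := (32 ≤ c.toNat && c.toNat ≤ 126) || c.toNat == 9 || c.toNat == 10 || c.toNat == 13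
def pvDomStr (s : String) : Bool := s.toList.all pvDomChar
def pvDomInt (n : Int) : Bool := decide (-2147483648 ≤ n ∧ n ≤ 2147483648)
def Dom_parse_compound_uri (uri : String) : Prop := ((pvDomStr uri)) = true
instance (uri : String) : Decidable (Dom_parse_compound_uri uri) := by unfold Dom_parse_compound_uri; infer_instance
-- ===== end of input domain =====

-- B replaces A's single imperative loop threading (chunks, current, depth) state with a
-- recursive top-level splitter that builds the argument segments directly, pops a trailing
-- empty segment, and formats with a final map (alternative decomposition, similar cost).


-- ===== PORT A =====
-- shared module helpers (identical Python code in Source A and Source B)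
-- piece.strip('/')
def pvStripSlash (s : String) : String := PySem.Str.stripChars s "/"

-- join_uri(*pieces): '/' + '/'.join(piece.strip('/') for piece in pieces)
def pvJoinUri (pieces : List String) : String :=
  "/" ++ PySem.Str.join "/" (pieces.map pvStripSlash)

-- split_uri(uri): uri.lstrip('/') (exact by hand: the strip set is the single char '/'),
-- then '' → [], else uri2.split('/'); sep "/" ≠ "" so split? is some and getD is its total form.
def pvSplitUri (uri : String) : List String :=
  let uri2 := String.ofList (uri.toList.dropWhile (· == '/'))
  if uri2 == "" then [] else (PySem.Str.split? uri2 "/").getD []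

-- '/' + ('/'.join(current)).strip('/')   (the chunk-formatting expression both sources contain)
def pvFmt (current : List String) : String :=
  "/" ++ pvStripSlash (PySem.Str.join "/" current)

-- the body of A's for-loop, verbatim: state is (chunks, current, depth)
def pvStepA (st : List String × List String × Int) (piece : String) :
    List String × List String × Int :=
  if piece == "," && st.2.2 == 0 then
    (st.1 ++ [pvFmt st.2.1], [], st.2.2)
  else
    (st.1, st.2.1 ++ [piece],
      if piece == "[" then st.2.2 + 1
      else if piece == "]" then st.2.2 - 1
      else st.2.2)

-- parse_compound_uri (A). The two ValueError raises, the IndexError of pieces[-1] on an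
-- empty list and the assert are raise points: Pre_ excludes exactly those inputs and the
-- port proceeds on the happy path.
def parse_compound_uri (uri : String) : String × List String :=
  let pieces := pvSplitUri uri
  let list_start : Nat := (PySem.List.index? pieces "[").getD 0
  let op := pvJoinUri (PySem.List.slice pieces none (some (list_start : Int)))
  let inner := PySem.List.slice pieces (some ((list_start : Int) + 1)) (some (-1))
  let r := inner.foldl pvStepA ([], [], 0)
  let chunks := if !r.2.1.isEmpty then r.1 ++ [pvFmt r.2.1] else r.1
  (op, chunks)

-- ===== PORT B =====
-- _split_top(ps, depth): recursive descent splitting at top-level commas.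
-- segs[0] / segs[1:] are rendered total as headD [] / tail (the result is never empty).
def pvSplitTop : List String → Int → List (List String)
  | [], _ => [[]]
  | head :: rest, depth =>
    if head == "," && depth == 0 then
      [] :: pvSplitTop rest 0
    else
      let segs := pvSplitTop rest
        (depth + (if head == "[" then 1 else 0) - (if head == "]" then 1 else 0))
      (head :: segs.headD []) :: segs.tail

def parse_compound_uri_alt (uri : String) : String × List String :=
  let pieces := pvSplitUri uri
  let list_start : Nat := (PySem.List.index? pieces "[").getD 0
  let op := pvJoinUri (PySem.List.slice pieces none (some (list_start : Int)))
  let inner := PySem.List.slice pieces (some ((list_start : Int) + 1)) (some (-1))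
  let segs := pvSplitTop inner 0
  let segs := if segs.getLast? == some [] then segs.dropLast else segs
  (op, segs.map pvFmt)

-- ===== PRECONDITION & SPEC =====
-- Pre_ excludes exactly the inputs where the Python A raises: IndexError (no pieces),
-- the two ValueErrors (last piece not ']', no '[' piece), and the AssertionError
-- (unbalanced brackets in the argument list).
def Pre_parse_compound_uri (uri : String) : Prop :=
  let pieces := pvSplitUri uri
  pieces.getLast? = some "]" ∧ "[" ∈ pieces ∧
    (PySem.List.slice pieces
        (some ((((PySem.List.index? pieces "[").getD 0 : Nat) : Int) + 1)) (some (-1))).count "[" =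
    (PySem.List.slice pieces
        (some ((((PySem.List.index? pieces "[").getD 0 : Nat) : Int) + 1)) (some (-1))).count "]"
instance (uri : String) : Decidable (Pre_parse_compound_uri uri) := by
  unfold Pre_parse_compound_uri; infer_instance

def pvWitness_parse_compound_uri : String := "/a/[/r/CapableOf/,/c/en/cat/]"

def Spec_parse_compound_uri (uri : String) (out : String × List String) : Prop := out = parse_compound_uri_alt uri
instance (uri : String) (out : String × List String) : Decidable (Spec_parse_compound_uri uri out) := by unfold Spec_parse_compound_uri; infer_instance

-- ===== CLAIM (what is proved, stated in full; the proofs are below) =====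
def Claim_equal_parse_compound_uri : Prop := ∀ (uri : String), Dom_parse_compound_uri uri → Pre_parse_compound_uri uri → Spec_parse_compound_uri uri (parse_compound_uri uri)

-- ===== LEMMAS AND PROOFS =====

lemma pvSplitTop_ne_nil (l : List String) (d : Int) : pvSplitTop l d ≠ [] := by
  cases l with
  | nil => simp [pvSplitTop]
  | cons h t =>
    simp only [pvSplitTop]
    split <;> simp

-- A's loop+postlude, run from any state, equals B's split-pop-map applied to the
-- remaining pieces with `cur` prepended to the first segment.
lemma pv_loop_eq (l : List String) : ∀ (chunks cur : List String) (d : Int),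
    (if !(l.foldl pvStepA (chunks, cur, d)).2.1.isEmpty
     then (l.foldl pvStepA (chunks, cur, d)).1 ++ [pvFmt (l.foldl pvStepA (chunks, cur, d)).2.1]
     else (l.foldl pvStepA (chunks, cur, d)).1)
    = chunks ++
      (if ((cur ++ (pvSplitTop l d).headD []) :: (pvSplitTop l d).tail).getLast? == some []
       then ((cur ++ (pvSplitTop l d).headD []) :: (pvSplitTop l d).tail).dropLast
       else ((cur ++ (pvSplitTop l d).headD []) :: (pvSplitTop l d).tail)).map pvFmt := by
  induction l with
  | nil =>
    intro chunks cur d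
    simp only [List.foldl, pvSplitTop, List.headD, List.tail, List.append_nil]
    by_cases hc : cur = []
    · subst hc; simp
    · simp [hc]
  | cons p rest ih =>
    intro chunks cur d
    by_cases hc : p = "," ∧ d = 0
    · -- a top-level comma: A emits a chunk and resets; B starts a new segment
      obtain ⟨hp, hd⟩ := hc
      subst hp; subst hd
      obtain ⟨s0, tl, hs⟩ := List.exists_cons_of_ne_nil (pvSplitTop_ne_nil rest 0)
      simp only [List.foldl_cons, pvStepA, beq_self_eq_true, Bool.and_self, if_pos]
      rw [ih (chunks ++ [pvFmt cur]) [] 0]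
      simp only [pvSplitTop, beq_self_eq_true, Bool.and_self, if_pos, hs, List.headD,
        List.tail, List.nil_append, List.append_assoc]
      cases tl with
      | nil =>
        by_cases h0 : s0 = [] <;> simp [h0]
      | cons a t =>
        simp [List.getLast?_cons_cons]
        split <;> simp
    · -- not a splitting comma: the piece joins the current segment on both sides
      have hcb : (p == "," && d == 0) = false := by
        rw [Bool.eq_false_iff]
        intro h
        exact hc (by simpa using h)
      have hdepth :
          (if p == "[" then d + 1 else if p == "]" then d - 1 else d)
          = d + (if p == "[" then 1 else 0) - (if p == "]" then 1 else 0) := by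
        by_cases h1 : (p == "[") = true
        · have h2 : (p == "]") = false := by
            have hp : p = "[" := eq_of_beq h1
            subst hp; decide
          simp [h1, h2]
        · by_cases h2 : (p == "]") = true <;> simp [h1, h2]
      obtain ⟨s0, tl, hs⟩ :=
        List.exists_cons_of_ne_nil (pvSplitTop_ne_nil rest
          (d + (if p == "[" then 1 else 0) - (if p == "]" then 1 else 0)))
      simp only [List.foldl_cons, pvStepA, hcb, Bool.false_eq_true, if_false]
      rw [hdepth, ih chunks (cur ++ [p]) _]
      simp only [pvSplitTop, hcb, Bool.false_eq_true, if_false, hs, List.headD, List.tail,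
        List.append_assoc, List.cons_append, List.nil_append]

lemma pv_ports_eq (uri : String) : parse_compound_uri uri = parse_compound_uri_alt uri := by
  unfold parse_compound_uri parse_compound_uri_alt
  dsimp only
  refine Prod.ext rfl ?_
  obtain ⟨s0, tl, hs⟩ := List.exists_cons_of_ne_nil (pvSplitTop_ne_nil
    (PySem.List.slice (pvSplitUri uri)
      (some ((((PySem.List.index? (pvSplitUri uri) "[").getD 0 : Nat) : Int) + 1)) (some (-1))) 0)
  have h := pv_loop_eq
    (PySem.List.slice (pvSplitUri uri)
      (some ((((PySem.List.index? (pvSplitUri uri) "[").getD 0 : Nat) : Int) + 1)) (some (-1)))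
    [] [] 0
  rw [hs] at h ⊢
  simp only [List.headD, List.tail, List.nil_append] at h
  exact h

-- ===== VERDICT (by name: the statement is the Claim_ definition above) =====
theorem parse_compound_uri_spec : Claim_equal_parse_compound_uri := by
  intro uri _ _
  unfold Spec_parse_compound_uri
  exact pv_ports_eq uri
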